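-- pv_equiv track=rewrite | github.com/crcrpar/lightning-thunder | thunder/executors/nvfuser.py | _make_contiguous_strides_for
-- ===== SOURCE A (Python) =====
-- def _make_contiguous_strides_for(shape):
--     """Returns the strides of a contiguous tensor if row_major."""
--     if len(shape) == 0:
--         return ()
--
--     multiplier = 1
--     strides = []
--     for l in reversed(shape):
--         strides.append(multiplier)
--         if l != 0:
--             multiplier *= l
--
--     result = tuple(reversed(strides))
--
--     return result
-- ===== SOURCE B (Python) =====
-- def _make_contiguous_strides_for(shape):
--     """Returns the strides of a contiguous tensor if row_major."""
--     total = 1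
--     for d in shape:
--         if d != 0:
--             total *= d
--     strides = []
--     cur = total
--     for d in shape:
--         if d != 0:
--             cur //= d
--         strides.append(cur)
--     return tuple(strides)
-- ===== Notes on version B (the rewrite author's own statement) =====
-- stated objective: alternative
-- what changed: B makes two forward passes - first the product of all nonzero dims, then each stride by exact floor-division of a running value by the current nonzero dim - instead of A's single reversed pass that accumulates a multiplier and reverses the collected list.
import Mathlib
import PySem

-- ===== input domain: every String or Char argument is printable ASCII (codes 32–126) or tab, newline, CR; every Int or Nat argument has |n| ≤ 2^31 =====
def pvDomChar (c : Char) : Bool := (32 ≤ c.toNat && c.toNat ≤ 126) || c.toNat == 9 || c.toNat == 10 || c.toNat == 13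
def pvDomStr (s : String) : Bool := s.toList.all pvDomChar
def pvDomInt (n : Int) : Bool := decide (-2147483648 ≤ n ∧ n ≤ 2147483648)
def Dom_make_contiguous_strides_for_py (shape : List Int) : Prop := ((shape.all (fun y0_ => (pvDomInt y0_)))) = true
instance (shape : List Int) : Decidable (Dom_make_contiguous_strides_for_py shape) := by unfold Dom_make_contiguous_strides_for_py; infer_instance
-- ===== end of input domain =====

-- B replaces A's single reversed accumulating pass by two forward passes: the product of all
-- nonzero dims once, then each stride by exact division of the running value (alternative decomposition, same results).


-- ===== PORT A =====
-- literal port of A: reversed loop appending the running multiplier, then reverse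
def make_contiguous_strides_for_py (shape : List Int) : List Int :=
  if shape.length = 0 then []
  else
    let st := shape.reverse.foldl
      (fun (st : List Int × Int) l =>
        (st.1 ++ [st.2], if l ≠ 0 then st.2 * l else st.2)) ([], 1)
    st.1.reverse

-- ===== PORT B =====
-- literal port of B: total product of the nonzero dims, then a forward pass dividing out
-- each nonzero dim ('//' is Python floor division = PySem.Int.floordiv; exact here)
def make_contiguous_strides_for_py_alt (shape : List Int) : List Int :=
  let total := shape.foldl (fun t d => if d ≠ 0 then t * d else t) 1
  (shape.foldl
    (fun (st : List Int × Int) d =>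
      let cur := if d ≠ 0 then PySem.Int.floordiv st.2 d else st.2
      (st.1 ++ [cur], cur)) ([], total)).1

-- ===== PRECONDITION & SPEC =====
def Spec_make_contiguous_strides_for_py (shape : List Int) (out : List Int) : Prop := out = make_contiguous_strides_for_py_alt shape
instance (shape : List Int) (out : List Int) : Decidable (Spec_make_contiguous_strides_for_py shape out) := by unfold Spec_make_contiguous_strides_for_py; infer_instance

-- ===== CLAIM (what is proved, stated in full; the proofs are below) =====
def Claim_equal_make_contiguous_strides_for_py : Prop := ∀ (shape : List Int), Dom_make_contiguous_strides_for_py shape → Spec_make_contiguous_strides_for_py shape (make_contiguous_strides_for_py shape)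

-- ===== LEMMAS AND PROOFS =====

-- common reference value: the i-th stride is the product of the nonzero dims to the right of i
def pvS (shape : List Int) : List Int :=
  (List.range shape.length).map (fun i => ((shape.drop (i + 1)).filter (fun d => d ≠ 0)).prod)

-- foldl with the "multiply if nonzero" step is the product of the nonzero elements
theorem pv_foldl_nz (xs : List Int) (a : Int) :
    xs.foldl (fun p d => if d ≠ 0 then p * d else p) a
      = a * ((xs.filter (fun d => d ≠ 0)).prod) := by
  induction xs generalizing a with
  | nil => simp
  | cons x xs ih =>
    rw [List.foldl_cons]
    by_cases hx : x = 0
    · rw [if_neg (by simp [hx]), List.filter_cons_of_neg (by simp [hx]), ih]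
    · rw [if_pos hx, List.filter_cons_of_pos (by simp [hx]), ih, List.prod_cons, mul_assoc]

-- second component of A's loop state is the running product of the nonzero elements
theorem pv_loop_snd (rs : List Int) (s : List Int) (m : Int) :
    (rs.foldl (fun (st : List Int × Int) l =>
        (st.1 ++ [st.2], if l ≠ 0 then st.2 * l else st.2)) (s, m)).2
      = m * ((rs.filter (fun d => d ≠ 0)).prod) := by
  induction rs generalizing s m with
  | nil => simp
  | cons r rs ih =>
    rw [List.foldl_cons]
    by_cases hr : r = 0
    · rw [List.filter_cons_of_neg (by simp [hr])]
      show (rs.foldl _ (s ++ [m], if r ≠ 0 then m * r else m)).2 = _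
      rw [if_neg (by simp [hr]), ih]
    · rw [List.filter_cons_of_pos (by simp [hr])]
      show (rs.foldl _ (s ++ [m], if r ≠ 0 then m * r else m)).2 = _
      rw [if_pos hr, ih, List.prod_cons, mul_assoc]

theorem pv_S_cons (x : Int) (xs : List Int) :
    pvS (x :: xs) = ((xs.filter (fun d => d ≠ 0)).prod) :: pvS xs := by
  simp only [pvS, List.length_cons, List.range_succ_eq_map, List.map_cons, List.map_map]
  rfl

theorem pv_A_cons (x : Int) (xs : List Int) :
    make_contiguous_strides_for_py (x :: xs)
      = ((xs.filter (fun d => d ≠ 0)).prod) :: make_contiguous_strides_for_py xs := by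
  cases xs with
  | nil => simp [make_contiguous_strides_for_py]
  | cons y ys =>
    simp only [make_contiguous_strides_for_py, List.length_cons]
    rw [if_neg (by omega), if_neg (by omega)]
    rw [List.reverse_cons, List.foldl_append]
    simp only [List.foldl_cons, List.foldl_nil]
    rw [List.reverse_append]
    simp only [List.reverse_cons, List.reverse_nil, List.nil_append, List.singleton_append]
    congr 1
    rw [pv_loop_snd, one_mul, List.filter_append, List.prod_append,
      List.filter_reverse, List.prod_reverse]
    by_cases hy : y = 0 <;> simp [hy, mul_comm]

-- B's division loop, started at the product of the nonzero elements of rs, lists the suffix products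
theorem pv_loop_div (rs : List Int) (s : List Int) (m : Int)
    (h : m = (rs.filter (fun d => d ≠ 0)).prod) :
    (rs.foldl
      (fun (st : List Int × Int) d =>
        let cur := if d ≠ 0 then PySem.Int.floordiv st.2 d else st.2
        (st.1 ++ [cur], cur)) (s, m)).1
      = s ++ (List.range rs.length).map (fun i => ((rs.drop (i + 1)).filter (fun d => d ≠ 0)).prod) := by
  induction rs generalizing s m with
  | nil => simp
  | cons d rs ih =>
    have hcur : (if d ≠ 0 then PySem.Int.floordiv m d else m)
        = (rs.filter (fun d => d ≠ 0)).prod := by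
      by_cases hd : d = 0
      · rw [if_neg (by simp [hd]), h, List.filter_cons_of_neg (by simp [hd])]
      · rw [if_pos hd, h, List.filter_cons_of_pos (by simp [hd]), List.prod_cons]
        simp [PySem.Int.floordiv, Int.mul_fdiv_cancel_left _ hd]
    rw [List.foldl_cons]
    show (rs.foldl _ (s ++ [if d ≠ 0 then PySem.Int.floordiv m d else m],
        if d ≠ 0 then PySem.Int.floordiv m d else m)).1 = _
    rw [ih _ _ hcur, List.length_cons, List.range_succ_eq_map, List.map_cons, List.map_map,
      List.append_assoc, List.singleton_append]
    congr 2

theorem pv_B_eq_S (shape : List Int) :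
    make_contiguous_strides_for_py_alt shape = pvS shape := by
  simp only [make_contiguous_strides_for_py_alt]
  rw [pv_loop_div shape [] _ (by simpa using pv_foldl_nz shape 1)]
  simp [pvS]

-- ===== VERDICT (by name: the statement is the Claim_ definition above) =====
theorem make_contiguous_strides_for_py_spec : Claim_equal_make_contiguous_strides_for_py := by
  intro shape hdom
  clear hdom
  unfold Spec_make_contiguous_strides_for_py
  rw [pv_B_eq_S]
  induction shape with
  | nil => rfl
  | cons x xs ih => rw [pv_A_cons, pv_S_cons, ih]
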